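-- pv_equiv track=rewrite | github.com/Patrick-Grimes/coscholar | app.py | major_terms
-- ===== SOURCE A (Python) =====
-- MAJOR_ALIASES = {
--     "computer science": ["cs", "comp sci", "computer science", "computing", "software"],
--     "data science":     ["data science", "data analytics", "data analysis", "analytics"],
--     "engineering":      ["engineering", "engineer"],
--     "business":         ["business", "finance", "accounting", "economics", "econ"],
--     "biology":          ["biology", "bio", "life science", "biological"],
--     "psychology":       ["psychology", "psych"],
--     "nursing":          ["nursing", "nurse", "rn"],
--     "math":             ["math", "mathematics", "statistics", "stats"],
-- }
--
-- def major_terms(major: str) -> list[str]: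
--     m = major.lower().strip()
--     for key, aliases in MAJOR_ALIASES.items():
--         if m in aliases or m == key:
--             return aliases
--     terms = [m]
--     if " " in m:
--         terms.append(m.split()[0])
--     return terms
-- ===== SOURCE B (Python) =====
-- MAJOR_ALIASES = {
--     "computer science": ["cs", "comp sci", "computer science", "computing", "software"],
--     "data science":     ["data science", "data analytics", "data analysis", "analytics"],
--     "engineering":      ["engineering", "engineer"],
--     "business":         ["business", "finance", "accounting", "economics", "econ"],
--     "biology":          ["biology", "bio", "life science", "biological"],
--     "psychology":       ["psychology", "psych"],
--     "nursing":          ["nursing", "nurse", "rn"],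
--     "math":             ["math", "mathematics", "statistics", "stats"],
-- }
--
-- # Flat sorted array of (alias, alias-list) pairs, built once; every key is one of
-- # its own aliases and no alias occurs under two keys, so a binary search on this
-- # array finds exactly the entry A's scan would return.
-- PAIRS = sorted(
--     ((a, aliases) for aliases in MAJOR_ALIASES.values() for a in aliases),
--     key=lambda p: p[0],
-- )
--
-- def major_terms(major: str) -> list[str]:
--     m = major.lower().strip()
--     # bisect_left by hand over the sorted alias array
--     lo, hi = 0, len(PAIRS)
--     while lo < hi:
--         mid = (lo + hi) // 2
--         if PAIRS[mid][0] < m: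
--             lo = mid + 1
--         else:
--             hi = mid
--     if lo < len(PAIRS) and PAIRS[lo][0] == m:
--         return PAIRS[lo][1]
--     terms = [m]
--     if " " in m:
--         terms.append(m.split()[0])
--     return terms
-- ===== Notes on version B (the rewrite author's own statement) =====
-- stated objective: alternative
-- what changed: Replaces A's linear scan over the alias dict (membership test inside each entry) by a flat sorted array of (alias, alias-list) pairs built once and a hand-written bisect-left binary search per call; correct because every key is among its own aliases and no alias occurs under two keys.
import Mathlib
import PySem

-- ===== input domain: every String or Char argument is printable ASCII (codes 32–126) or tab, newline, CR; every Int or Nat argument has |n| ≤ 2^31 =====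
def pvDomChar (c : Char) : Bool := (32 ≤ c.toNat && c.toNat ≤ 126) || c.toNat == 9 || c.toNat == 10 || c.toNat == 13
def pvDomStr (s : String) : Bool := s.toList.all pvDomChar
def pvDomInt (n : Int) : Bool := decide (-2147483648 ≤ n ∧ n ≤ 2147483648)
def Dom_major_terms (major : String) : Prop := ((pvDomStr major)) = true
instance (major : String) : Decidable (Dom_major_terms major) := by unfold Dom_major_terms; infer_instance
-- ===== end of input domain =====

-- B replaces A's per-call linear scan over the alias dict by a flat sorted array of
-- (alias, alias-list) pairs and a hand-written bisect-left binary search.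

-- shared module constant (both Pythons define the same literal dict)
def MAJOR_ALIASES : List (String × List String) :=
  [("computer science", ["cs", "comp sci", "computer science", "computing", "software"]),
   ("data science",     ["data science", "data analytics", "data analysis", "analytics"]),
   ("engineering",      ["engineering", "engineer"]),
   ("business",         ["business", "finance", "accounting", "economics", "econ"]),
   ("biology",          ["biology", "bio", "life science", "biological"]),
   ("psychology",       ["psychology", "psych"]),
   ("nursing",          ["nursing", "nurse", "rn"]),
   ("math",             ["math", "mathematics", "statistics", "stats"])]

-- ===== PORT A =====
-- the 'for key, aliases in MAJOR_ALIASES.items(): if m in aliases or m == key: return aliases' loop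
def aScan (m : String) : List (String × List String) → Option (List String)
  | [] => none
  | (key, aliases) :: rest =>
      if aliases.contains m || m == key then some aliases else aScan m rest

def major_terms (major : String) : List String :=
  let m := PySem.Str.strip (PySem.Str.lower major)
  match aScan m MAJOR_ALIASES with
  | some aliases => aliases
  | none =>
      let terms := [m]
      if PySem.Str.isIn " " m then
        terms ++ [(PySem.Str.split₀ m).headD ""]   -- m.split()[0]; " " in m (m is stripped) ⇒ split() nonempty
      else terms

-- ===== PORT B =====
-- PAIRS = sorted(((a, aliases) for aliases in MAJOR_ALIASES.values() for a in aliases), key=lambda p: p[0]);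
-- alias keys are carried as List Char (PySem's representation of Python strings: '<' on str
-- is '<' on toList, code-point lexicographic)
def PAIRS : List (List Char × List String) :=
  PySem.List.sorted (MAJOR_ALIASES.flatMap (fun kv => kv.2.map (fun a => (a.toList, kv.2)))) (fun p => p.1) false

-- 'while lo < hi: mid = (lo + hi) // 2; if PAIRS[mid][0] < m: lo = mid + 1 else: hi = mid'
-- (structural recursion on a fuel initialised to hi - lo, which bounds the iteration count:
-- the interval shrinks by at least one each turn, so the fuel never runs out)
def bsearch (m : List Char) : Nat → Nat → Nat → Nat
  | 0, lo, _ => lo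
  | fuel + 1, lo, hi =>
    if lo < hi then
      let mid := (lo + hi) / 2
      if (PAIRS.getD mid ([], [])).1 < m then bsearch m fuel (mid + 1) hi
      else bsearch m fuel lo mid
    else lo

def major_terms_alt (major : String) : List String :=
  let m := PySem.Str.strip (PySem.Str.lower major)
  let lo := bsearch m.toList PAIRS.length 0 PAIRS.length
  match PAIRS[lo]? with                       -- 'if lo < len(PAIRS) and PAIRS[lo][0] == m'
  | some (a, aliases) =>
      if a == m.toList then aliases
      else if PySem.Str.isIn " " m then [m, (PySem.Str.split₀ m).headD ""] else [m]
  | none =>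
      if PySem.Str.isIn " " m then [m, (PySem.Str.split₀ m).headD ""] else [m]

-- ===== PRECONDITION & SPEC =====
def Spec_major_terms (major : String) (out : List String) : Prop := out = major_terms_alt major
instance (major : String) (out : List String) : Decidable (Spec_major_terms major out) := by unfold Spec_major_terms; infer_instance

-- ===== CLAIM (what is proved, stated in full; the proofs are below) =====
def Claim_equal_major_terms : Prop := ∀ (major : String), Dom_major_terms major → Spec_major_terms major (major_terms major)

-- ===== LEMMAS AND PROOFS =====

-- B's lookup core: what major_terms_alt computes before the fallback
def bLookup (mL : List Char) : Option (List String) :=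
  match PAIRS[bsearch mL PAIRS.length 0 PAIRS.length]? with
  | some (a, aliases) => if a == mL then some aliases else none
  | none => none

-- every string that can trigger a hit in either version (all aliases; every key is among its aliases)
def ALL : List String := ["cs", "comp sci", "computer science", "computing", "software", "data science", "data analytics", "data analysis", "analytics", "engineering", "engineer", "business", "finance", "accounting", "economics", "econ", "biology", "bio", "life science", "biological", "psychology", "psych", "nursing", "nurse", "rn", "math", "mathematics", "statistics", "stats"]

lemma pairs_fst_all : ∀ p ∈ PAIRS, p.1 ∈ ALL.map String.toList := by decide

lemma ma_all : ∀ kv ∈ MAJOR_ALIASES, kv.1 ∈ ALL ∧ ∀ a ∈ kv.2, a ∈ ALL := by decide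

lemma aScan_none {m : String} {l : List (String × List String)}
    (h : ∀ kv ∈ l, m ∉ kv.2 ∧ m ≠ kv.1) : aScan m l = none := by
  induction l with
  | nil => rfl
  | cons kv rest ih =>
      obtain ⟨h1, h2⟩ := h kv (List.mem_cons_self)
      simp only [aScan]
      rw [if_neg, ih (fun kv hkv => h kv (List.mem_cons_of_mem _ hkv))]
      simp [List.contains_eq_mem, h1, h2]

lemma bLookup_none {m : String} (h : m ∉ ALL) : bLookup m.toList = none := by
  unfold bLookup
  cases hp : PAIRS[bsearch m.toList PAIRS.length 0 PAIRS.length]? with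
  | none => rfl
  | some p =>
      obtain ⟨a, al⟩ := p
      have hmem : (a, al) ∈ PAIRS := List.mem_of_getElem? hp
      obtain ⟨s, hs, rfl⟩ := List.mem_map.mp (pairs_fst_all _ hmem)
      have hne : (s.toList == m.toList) = false := by
        simp only [beq_eq_false_iff_ne]
        intro he; exact h (String.toList_inj.mp he ▸ hs)
      simp [hne]

lemma core_eq (m : String) : aScan m MAJOR_ALIASES = bLookup m.toList := by
  by_cases h : m ∈ ALL
  · fin_cases h <;> decide
  · rw [bLookup_none h, aScan_none]
    intro kv hkv
    obtain ⟨hk, ha⟩ := ma_all kv hkv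
    exact ⟨fun hm => h (ha m hm), fun hm => h (hm ▸ hk)⟩

-- ===== VERDICT (by name: the statement is the Claim_ definition above) =====
theorem major_terms_spec : Claim_equal_major_terms := by
  intro major _
  unfold Spec_major_terms major_terms major_terms_alt
  simp only [core_eq]
  unfold bLookup
  cases hp : PAIRS[bsearch (PySem.Str.strip (PySem.Str.lower major)).toList PAIRS.length 0 PAIRS.length]? with
  | none => simp
  | some p =>
      obtain ⟨a, al⟩ := p
      by_cases he : a = PySem.Chars.strip (PySem.Chars.lower major.toList) <;> simp [he]
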